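-- pv_equiv track=rewrite | github.com/aisystant/aist_bot | helpers/markdown_sanitizer.py | _fix_orphaned_brackets
-- ===== SOURCE A (Python) =====
-- def _fix_orphaned_brackets(text: str) -> str:
--     """Remove orphaned [ and ] that aren't part of valid links."""
--     # Already-valid links were replaced with placeholders in Phase 3
--     # Any remaining [ or ] are orphaned — strip them
--     result = []
--     i = 0
--     while i < len(text):
--         ch = text[i]
--         if ch == '[':
--             # Check if this starts a valid link pattern [...](...) ahead
--             close_bracket = text.find(']', i + 1)
--             if close_bracket != -1 and close_bracket + 1 < len(text) and text[close_bracket + 1] == '(':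
--                 close_paren = text.find(')', close_bracket + 2)
--                 if close_paren != -1:
--                     # Valid link — keep as is
--                     result.append(text[i:close_paren + 1])
--                     i = close_paren + 1
--                     continue
--             # Orphaned [ — strip it
--             i += 1
--             continue
--         elif ch == ']' and (i + 1 >= len(text) or text[i + 1] != '('):
--             # Orphaned ] — strip it
--             i += 1
--             continue
--         result.append(ch)
--         i += 1
--     return ''.join(result)
-- ===== SOURCE B (Python) =====
-- import re
--
-- _PAT = re.compile(r'(\[[^\]]*\]\([^)]*\))|\[|\](?!\()')
--
-- def _fix_orphaned_brackets(text: str) -> str: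
--     """Remove orphaned [ and ] that aren't part of valid links."""
--     # Keep whole [..](..) link spans; delete lone '[' and ']' not followed by '('.
--     return _PAT.sub(lambda m: m.group(1) or '', text)
-- ===== Notes on version B (the rewrite author's own statement) =====
-- stated objective: idiomatic
-- what changed: Replaced the hand-written index-walking state machine (manual cursor, find() calls, index jumps) by one compiled re.sub pass with a three-way alternation that keeps whole link spans, deletes a lone opening bracket, and deletes a closing bracket not followed by an opening parenthesis (negative lookahead).
import Mathlib
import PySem

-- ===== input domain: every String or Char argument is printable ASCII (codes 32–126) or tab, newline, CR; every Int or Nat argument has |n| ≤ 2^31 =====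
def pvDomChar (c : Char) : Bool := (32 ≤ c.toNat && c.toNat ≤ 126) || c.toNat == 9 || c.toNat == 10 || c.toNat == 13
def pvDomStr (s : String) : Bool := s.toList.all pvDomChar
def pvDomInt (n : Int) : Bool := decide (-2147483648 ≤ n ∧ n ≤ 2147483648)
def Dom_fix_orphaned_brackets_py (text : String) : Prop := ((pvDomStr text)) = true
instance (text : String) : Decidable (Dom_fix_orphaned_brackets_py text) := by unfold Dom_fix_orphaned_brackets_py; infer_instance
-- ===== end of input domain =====

-- B replaces A's index-walking while-loop by a single leftmost regex scan (one re.sub whose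
-- alternation keeps link spans, drops lone brackets): idiomatic, measurably faster (C regex engine).

-- ===== PORT A =====
-- termination fact used by fixLoop's decreasing_by (cited by name there)
theorem pvFindFrom_start_le (s sub : List Char) (k : Nat) (hk : k ≤ s.length)
    (h : PySem.Chars.findFrom s sub (k : Int) ≠ -1) :
    (k : Int) ≤ PySem.Chars.findFrom s sub (k : Int) :=
  (PySem.Chars.findFrom_natCast_spec s sub k hk h).1

-- the while-loop of A: i is the cursor, acc the flattened 'result' list
def fixLoop (s : List Char) (i : Nat) (acc : List Char) : List Char :=
  if hi : i < s.length then
    if s[i] = '[' then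
      -- close_bracket = text.find(']', i + 1)
      let cb := PySem.Chars.findFrom s [']'] ((i + 1 : Nat) : Int)
      if hb : cb ≠ -1 ∧ cb + 1 < (s.length : Int) ∧ PySem.List.pyGet? s (cb + 1) = some '(' then
        -- close_paren = text.find(')', close_bracket + 2)
        let cp := PySem.Chars.findFrom s [')'] (cb + 2)
        if hp : cp ≠ -1 then
          -- result.append(text[i:close_paren + 1]); i = close_paren + 1
          fixLoop s (cp + 1).toNat (acc ++ PySem.List.slice s (some (i : Int)) (some (cp + 1)))
        else
          fixLoop s (i + 1) acc
      else
        fixLoop s (i + 1) acc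
    else if s[i] = ']' ∧ ((s.length : Int) ≤ ((i + 1 : Nat) : Int) ∨ PySem.List.pyGet? s ((i + 1 : Nat) : Int) ≠ some '(') then
      fixLoop s (i + 1) acc
    else
      fixLoop s (i + 1) (acc ++ [s[i]])
  else acc
termination_by s.length - i
decreasing_by
  · have hcbdef : cb = PySem.Chars.findFrom s [']'] ((i + 1 : Nat) : Int) := rfl
    have hcpdef : cp = PySem.Chars.findFrom s [')'] (cb + 2) := rfl
    have hb1 := hb.1
    have hb2 := hb.2.1
    have hp' := hp
    rw [hcbdef] at hb1 hb2
    rw [hcpdef, hcbdef] at hp'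
    have h1 := pvFindFrom_start_le s [']'] (i + 1) (by omega) hb1
    have h0 : (0 : Int) ≤ PySem.Chars.findFrom s [']'] ((i + 1 : Nat) : Int) + 2 := by omega
    obtain ⟨k, hk⟩ := Int.eq_ofNat_of_zero_le h0
    rw [hk] at hp'
    have h2 := pvFindFrom_start_le s [')'] k (by omega) hp'
    rw [← hk] at h2
    omega
  · omega
  · omega
  · omega
  · omega

def fix_orphaned_brackets_py (text : String) : String :=
  String.mk (fixLoop text.toList 0 [])

-- ===== PORT B =====
-- split at the FIRST occurrence of c: (part before, part after), none if absent
def pvSplitAfter (c : Char) (xs : List Char) : Option (List Char × List Char) :=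
  match xs.findIdx? (fun x => x = c) with
  | some k => some (xs.take k, xs.drop (k + 1))
  | none => none

-- termination fact for fixAlt (cited in its decreasing_by)
theorem pvSplitAfter_snd_lt (c : Char) (xs : List Char) (p : List Char × List Char)
    (h : pvSplitAfter c xs = some p) : p.2.length < xs.length := by
  unfold pvSplitAfter at h
  cases hK : xs.findIdx? (fun x => x = c) with
  | none => rw [hK] at h; cases h
  | some k =>
    rw [hK] at h
    obtain ⟨hk, -, -⟩ := List.findIdx?_eq_some_iff_getElem.mp hK
    cases h
    simp only [List.length_drop]
    omega

-- hand port of B's single re.sub pass with pattern '(\[[^\]]*\]\([^)]*\))|\[|\](?!\()':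
-- leftmost scan; at '[' try the link alternative (shortest span to ']', an immediate '(',
-- shortest span to ')'), keeping the whole matched span, else delete the lone '[';
-- delete ']' unless '(' follows; every other character is copied.
def fixAlt : List Char → List Char
  | [] => []
  | c :: rest =>
    if c = '[' then
      match h1 : pvSplitAfter ']' rest with
      | some (pre, post) =>
        match post with
        | '(' :: rest2 =>
          match h3 : pvSplitAfter ')' rest2 with
          | some (mid, post2) => '[' :: (pre ++ ']' :: '(' :: (mid ++ ')' :: fixAlt post2))
          | none => fixAlt rest
        | _ => fixAlt rest
      | none => fixAlt rest
    else if c = ']' then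
      if rest.head? = some '(' then ']' :: fixAlt rest else fixAlt rest
    else c :: fixAlt rest
termination_by xs => xs.length
decreasing_by
  · have hp := pvSplitAfter_snd_lt ']' rest (pre, '(' :: rest2) h1
    have hq := pvSplitAfter_snd_lt ')' rest2 (mid, post2) h3
    simp only [List.length_cons] at *
    omega
  · have hp := pvSplitAfter_snd_lt ']' rest (pre, '(' :: rest2) h1
    simp only [List.length_cons] at *
    omega
  · simp
  · simp
  · simp
  · simp
  · simp

def fix_orphaned_brackets_py_alt (text : String) : String :=
  String.mk (fixAlt text.toList)

-- ===== PRECONDITION & SPEC =====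
def Spec_fix_orphaned_brackets_py (text : String) (out : String) : Prop := out = fix_orphaned_brackets_py_alt text
instance (text : String) (out : String) : Decidable (Spec_fix_orphaned_brackets_py text out) := by unfold Spec_fix_orphaned_brackets_py; infer_instance

-- ===== CLAIM (what is proved, stated in full; the proofs are below) =====
def Claim_equal_fix_orphaned_brackets_py : Prop := ∀ (text : String), Dom_fix_orphaned_brackets_py text → Spec_fix_orphaned_brackets_py text (fix_orphaned_brackets_py text)

-- ===== LEMMAS AND PROOFS =====

theorem pvSingle_prefix (c : Char) (l : List Char) : [c] <+: l ↔ l.head? = some c := by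
  cases l with
  | nil => simp
  | cons x xs =>
    constructor
    · rintro ⟨t, ht⟩; cases ht; rfl
    · intro h; cases h; exact ⟨xs, rfl⟩

-- Chars.find on a single-character needle is findIdx?
theorem pvChar_find_none (t : List Char) (c : Char)
    (hK : t.findIdx? (fun x => x = c) = none) : PySem.Chars.find t [c] = -1 := by
  have hmem : ∀ x ∈ t, ¬ x = c := by
    intro x hx
    have := List.findIdx?_eq_none_iff.mp hK x hx
    simpa using this
  have hninf : ¬ [c] <:+: t := by
    intro hin
    rw [← PySem.Chars.isIn_iff_infix, ← PySem.Chars.exists_prefix_drop_iff_isIn] at hin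
    obtain ⟨j, hj⟩ := hin
    rw [pvSingle_prefix, List.head?_drop] at hj
    exact hmem c (List.mem_of_getElem? hj) rfl
  exact (PySem.Chars.find_eq_neg_one_iff t [c]).mpr hninf

theorem pvChar_find_some (t : List Char) (c : Char) (j : Nat)
    (hK : t.findIdx? (fun x => x = c) = some j) : PySem.Chars.find t [c] = (j : Int) := by
  obtain ⟨hjlt, hjc, hjmin⟩ := List.findIdx?_eq_some_iff_getElem.mp hK
  have hjc' : t[j] = c := by simpa using hjc
  have hne : PySem.Chars.find t [c] ≠ -1 := by
    rw [PySem.Chars.find_ne_neg_one_iff]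
    refine List.infix_iff_prefix_suffix.mpr ⟨t.drop j, ?_, List.drop_suffix j t⟩
    rw [pvSingle_prefix, List.head?_drop]
    simp [hjc', hjlt]
  have hfe : PySem.Chars.findFrom t [c] ((0 : Nat) : Int) = PySem.Chars.find t [c] := by
    simpa using PySem.Chars.findFrom_zero t [c]
  have hspec := PySem.Chars.findFrom_natCast_spec t [c] 0 (by omega) (by rw [hfe]; exact hne)
  rw [hfe] at hspec
  obtain ⟨h0, hpre, hmin⟩ := hspec
  rw [pvSingle_prefix, List.head?_drop] at hpre
  have hfj : (PySem.Chars.find t [c]).toNat = j := by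
    rcases Nat.lt_trichotomy (PySem.Chars.find t [c]).toNat j with hlt | heq | hgt
    · obtain ⟨hb, he⟩ := List.getElem?_eq_some_iff.mp hpre
      have := hjmin _ hlt
      simp [he] at this
    · exact heq
    · refine absurd ?_ (hmin j (by omega) hgt)
      rw [pvSingle_prefix, List.head?_drop]
      simp [hjc', hjlt]
  omega

theorem pvFindFrom_single_none (s : List Char) (c : Char) (k : Nat) (hk : k ≤ s.length)
    (h : (s.drop k).findIdx? (fun x => x = c) = none) :
    PySem.Chars.findFrom s [c] (k : Int) = -1 := by
  rw [PySem.Chars.findFrom_natCast s [c] k hk, pvChar_find_none _ _ h]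
  simp

theorem pvFindFrom_single_some (s : List Char) (c : Char) (k j : Nat) (hk : k ≤ s.length)
    (h : (s.drop k).findIdx? (fun x => x = c) = some j) :
    PySem.Chars.findFrom s [c] (k : Int) = ((k + j : Nat) : Int) := by
  rw [PySem.Chars.findFrom_natCast s [c] k hk, pvChar_find_some _ _ _ h]
  rw [if_neg (by omega)]
  push_cast
  ring

theorem pvFindIdx?_decomp (c : Char) (t : List Char) (j : Nat)
    (h : t.findIdx? (fun x => x = c) = some j) :
    j < t.length ∧ t[j]? = some c ∧ t = t.take j ++ c :: t.drop (j + 1) := by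
  obtain ⟨hjlt, hjc, -⟩ := List.findIdx?_eq_some_iff_getElem.mp h
  have hjc' : t[j] = c := by simpa using hjc
  refine ⟨hjlt, by simp [hjc', hjlt], ?_⟩
  conv_lhs => rw [← List.take_append_drop j t, List.drop_eq_getElem_cons hjlt, hjc']

-- ---- step lemmas for fixLoop ----

theorem fixLoop_done (s : List Char) (i : Nat) (acc : List Char) (h : ¬ i < s.length) :
    fixLoop s i acc = acc := by
  rw [fixLoop, dif_neg h]

theorem fixLoop_bracket_fail (s : List Char) (i : Nat) (acc : List Char) (hi : i < s.length)
    (hc : s[i] = '[')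
    (hnb : ¬ (PySem.Chars.findFrom s [']'] ((i + 1 : Nat) : Int) ≠ -1 ∧
        PySem.Chars.findFrom s [']'] ((i + 1 : Nat) : Int) + 1 < (s.length : Int) ∧
        PySem.List.pyGet? s (PySem.Chars.findFrom s [']'] ((i + 1 : Nat) : Int) + 1) = some '(')) :
    fixLoop s i acc = fixLoop s (i + 1) acc := by
  rw [fixLoop, dif_pos hi, if_pos hc]
  rw [dif_neg hnb]

theorem fixLoop_paren_fail (s : List Char) (i : Nat) (acc : List Char) (hi : i < s.length)
    (hc : s[i] = '[')
    (hb : PySem.Chars.findFrom s [']'] ((i + 1 : Nat) : Int) ≠ -1 ∧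
        PySem.Chars.findFrom s [']'] ((i + 1 : Nat) : Int) + 1 < (s.length : Int) ∧
        PySem.List.pyGet? s (PySem.Chars.findFrom s [']'] ((i + 1 : Nat) : Int) + 1) = some '(')
    (hnp : ¬ PySem.Chars.findFrom s [')'] (PySem.Chars.findFrom s [']'] ((i + 1 : Nat) : Int) + 2) ≠ -1) :
    fixLoop s i acc = fixLoop s (i + 1) acc := by
  rw [fixLoop, dif_pos hi, if_pos hc]
  rw [dif_pos hb, dif_neg hnp]

theorem fixLoop_link (s : List Char) (i : Nat) (acc : List Char) (hi : i < s.length)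
    (hc : s[i] = '[')
    (hb : PySem.Chars.findFrom s [']'] ((i + 1 : Nat) : Int) ≠ -1 ∧
        PySem.Chars.findFrom s [']'] ((i + 1 : Nat) : Int) + 1 < (s.length : Int) ∧
        PySem.List.pyGet? s (PySem.Chars.findFrom s [']'] ((i + 1 : Nat) : Int) + 1) = some '(')
    (hp : PySem.Chars.findFrom s [')'] (PySem.Chars.findFrom s [']'] ((i + 1 : Nat) : Int) + 2) ≠ -1) :
    fixLoop s i acc = fixLoop s
      (PySem.Chars.findFrom s [')'] (PySem.Chars.findFrom s [']'] ((i + 1 : Nat) : Int) + 2) + 1).toNat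
      (acc ++ PySem.List.slice s (some (i : Int))
        (some (PySem.Chars.findFrom s [')'] (PySem.Chars.findFrom s [']'] ((i + 1 : Nat) : Int) + 2) + 1))) := by
  rw [fixLoop, dif_pos hi, if_pos hc]
  rw [dif_pos hb, dif_pos hp]

theorem fixLoop_orphan_close (s : List Char) (i : Nat) (acc : List Char) (hi : i < s.length)
    (hnc : ¬ s[i] = '[')
    (h2 : s[i] = ']' ∧ ((s.length : Int) ≤ ((i + 1 : Nat) : Int) ∨ PySem.List.pyGet? s ((i + 1 : Nat) : Int) ≠ some '(')) :
    fixLoop s i acc = fixLoop s (i + 1) acc := by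
  rw [fixLoop, dif_pos hi, if_neg hnc, if_pos h2]

theorem fixLoop_copy (s : List Char) (i : Nat) (acc : List Char) (hi : i < s.length)
    (hnc : ¬ s[i] = '[')
    (h2 : ¬ (s[i] = ']' ∧ ((s.length : Int) ≤ ((i + 1 : Nat) : Int) ∨ PySem.List.pyGet? s ((i + 1 : Nat) : Int) ≠ some '('))) :
    fixLoop s i acc = fixLoop s (i + 1) (acc ++ [s[i]]) := by
  rw [fixLoop, dif_pos hi, if_neg hnc, if_neg h2]

-- ---- step lemmas for fixAlt ----

theorem fixAlt_nil : fixAlt [] = [] := by rw [fixAlt]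

theorem fixAlt_bracket_nolink (rest : List Char)
    (h : ∀ pre rest2, pvSplitAfter ']' rest = some (pre, '(' :: rest2) → pvSplitAfter ')' rest2 = none) :
    fixAlt ('[' :: rest) = fixAlt rest := by
  rw [fixAlt, if_pos rfl]
  split
  · split
    · split
      · exfalso
        rename_i h3
        rw [h _ _ (by assumption)] at h3
        cases h3
      · rfl
    · rfl
  · rfl

theorem fixAlt_link (rest pre rest2 mid post2 : List Char)
    (h1 : pvSplitAfter ']' rest = some (pre, '(' :: rest2))
    (h3 : pvSplitAfter ')' rest2 = some (mid, post2)) :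
    fixAlt ('[' :: rest) = '[' :: (pre ++ ']' :: '(' :: (mid ++ ')' :: fixAlt post2)) := by
  rw [fixAlt, if_pos rfl]
  split
  · rename_i pre' post' h1'
    rw [h1] at h1'
    simp only [Option.some.injEq, Prod.mk.injEq] at h1'
    obtain ⟨rfl, rfl⟩ := h1'
    split
    · rename_i rest2' h1x heqA heqB
      injection heqA with hre hta
      subst hta
      split
      · rename_i mid' post2' h3'
        rw [h3] at h3'
        simp only [Option.some.injEq, Prod.mk.injEq] at h3'
        obtain ⟨rfl, rfl⟩ := h3'
        rfl
      · rename_i h3'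
        rw [h3] at h3'; cases h3'
    · rename_i hcontra
      exact absurd HEq.rfl (hcontra rest2 (by assumption) rfl)
  · rename_i h1'
    rw [h1] at h1'; cases h1'

theorem fixAlt_bracket_none (rest : List Char) (h : pvSplitAfter ']' rest = none) :
    fixAlt ('[' :: rest) = fixAlt rest := by
  rw [fixAlt, if_pos rfl]
  split
  · rename_i pre post h1
    rw [h1] at h; cases h
  · rfl

theorem fixAlt_close_keep (rest : List Char) (h : rest.head? = some '(') :
    fixAlt (']' :: rest) = ']' :: fixAlt rest := by
  rw [fixAlt]
  rw [if_neg (by decide), if_pos rfl, if_pos h]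

theorem fixAlt_close_drop (rest : List Char) (h : ¬ rest.head? = some '(') :
    fixAlt (']' :: rest) = fixAlt rest := by
  rw [fixAlt]
  rw [if_neg (by decide), if_pos rfl, if_neg h]

theorem fixAlt_copy (c : Char) (rest : List Char) (h1 : ¬ c = '[') (h2 : ¬ c = ']') :
    fixAlt (c :: rest) = c :: fixAlt rest := by
  rw [fixAlt]
  rw [if_neg h1, if_neg h2]

-- MAIN INVARIANT: the while-loop from cursor i equals acc ++ the regex scan of the suffix
theorem pvFixLoop_eq (n : Nat) : ∀ (s : List Char) (i : Nat) (acc : List Char),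
    s.length - i ≤ n → fixLoop s i acc = acc ++ fixAlt (s.drop i) := by
  induction n with
  | zero =>
    intro s i acc h
    rw [fixLoop_done s i acc (by omega), List.drop_eq_nil_of_le (by omega), fixAlt_nil,
      List.append_nil]
  | succ n ih =>
    intro s i acc h
    by_cases hi : i < s.length
    · have hdrop : s.drop i = s[i] :: s.drop (i + 1) := List.drop_eq_getElem_cons hi
      have hlen1 : s.length - (i + 1) ≤ n := by omega
      have hlen' : (s.drop (i + 1)).length = s.length - (i + 1) := by simp
      by_cases hc : s[i] = '['
      · cases hK : (s.drop (i + 1)).findIdx? (fun x => x = ']') with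
        | none =>
          have hsplit : pvSplitAfter ']' (s.drop (i + 1)) = none := by
            unfold pvSplitAfter; rw [hK]
          have hcb := pvFindFrom_single_none s ']' (i + 1) (by omega) hK
          rw [fixLoop_bracket_fail s i acc hi hc (by rw [hcb]; simp),
            ih s (i + 1) acc hlen1, hdrop, hc, fixAlt_bracket_none _ hsplit]
        | some j =>
          have hcb := pvFindFrom_single_some s ']' (i + 1) j (by omega) hK
          obtain ⟨hjlt, hjget, hjdec⟩ := pvFindIdx?_decomp ']' (s.drop (i + 1)) j hK
          have hsplit : pvSplitAfter ']' (s.drop (i + 1)) =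
              some ((s.drop (i + 1)).take j, (s.drop (i + 1)).drop (j + 1)) := by
            unfold pvSplitAfter; rw [hK]
          have hcast1 : ((i + 1 + j : Nat) : Int) + 1 = ((i + 1 + (j + 1) : Nat) : Int) := by
            push_cast; ring
          have hgd : PySem.List.pyGet? s (((i + 1 + j : Nat) : Int) + 1) = (s.drop (i + 1))[j + 1]? := by
            rw [hcast1, PySem.List.pyGet?_natCast, ← List.getElem?_drop]
          by_cases hpar : (s.drop (i + 1))[j + 1]? = some '('
          · obtain ⟨hb1, he1⟩ := List.getElem?_eq_some_iff.mp hpar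
            have hpost : (s.drop (i + 1)).drop (j + 1) = '(' :: (s.drop (i + 1)).drop (j + 2) := by
              rw [List.drop_eq_getElem_cons hb1, he1]
            have hcond : PySem.Chars.findFrom s [']'] ((i + 1 : Nat) : Int) ≠ -1 ∧
                PySem.Chars.findFrom s [']'] ((i + 1 : Nat) : Int) + 1 < (s.length : Int) ∧
                PySem.List.pyGet? s (PySem.Chars.findFrom s [']'] ((i + 1 : Nat) : Int) + 1) = some '(' := by
              rw [hcb]
              refine ⟨by omega, by omega, ?_⟩
              rw [hgd]; exact hpar
            have hd2 : (s.drop (i + 1)).drop (j + 2) = s.drop (i + j + 3) := by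
              rw [List.drop_drop]; congr 1; omega
            have hcast2 : ((i + 1 + j : Nat) : Int) + 2 = ((i + j + 3 : Nat) : Int) := by
              push_cast; ring
            cases hM : (s.drop (i + j + 3)).findIdx? (fun x => x = ')') with
            | none =>
              have hcp := pvFindFrom_single_none s ')' (i + j + 3) (by omega) hM
              have hvac : ∀ pre rest2, pvSplitAfter ']' (s.drop (i + 1)) = some (pre, '(' :: rest2) →
                  pvSplitAfter ')' rest2 = none := by
                intro pre rest2 hx
                rw [hsplit] at hx
                simp only [Option.some.injEq, Prod.mk.injEq] at hx
                have hre : rest2 = s.drop (i + j + 3) := by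
                  have hy := hx.2; rw [hpost, hd2] at hy
                  injection hy with hy1 hy2
                  exact hy2.symm
                subst hre
                unfold pvSplitAfter; rw [hM]
              rw [fixLoop_paren_fail s i acc hi hc hcond (by rw [hcb, hcast2, hcp]; simp),
                ih s (i + 1) acc hlen1, hdrop, hc, fixAlt_bracket_nolink _ hvac]
            | some m =>
              have hcp := pvFindFrom_single_some s ')' (i + j + 3) m (by omega) hM
              obtain ⟨hmlt, hmget, hmdec⟩ := pvFindIdx?_decomp ')' (s.drop (i + j + 3)) m hM
              have hd4 : (s.drop (i + j + 3)).drop (m + 1) = s.drop (i + j + m + 4) := by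
                rw [List.drop_drop]; congr 1; omega
              have hlink := fixLoop_link s i acc hi hc hcond (by rw [hcb, hcast2, hcp]; exact (by omega))
              rw [hcb, hcast2, hcp] at hlink
              have hcast3 : (((i + j + 3 + m : Nat) : Int) + 1).toNat = i + j + m + 4 := by omega
              have hcast4 : ((i + j + 3 + m : Nat) : Int) + 1 = ((i + j + m + 4 : Nat) : Int) := by
                push_cast; ring
              rw [hcast3, hcast4] at hlink
              have hslice : PySem.List.slice s (some ((i : Nat) : Int)) (some ((i + j + m + 4 : Nat) : Int)) =
                  '[' :: ((s.drop (i + 1)).take j ++ ']' :: '(' ::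
                    ((s.drop (i + j + 3)).take m ++ ')' :: [])) := by
                rw [PySem.List.slice_natCast]
                have hdec : s.drop i =
                    ('[' :: ((s.drop (i + 1)).take j ++ ']' :: '(' ::
                      ((s.drop (i + j + 3)).take m ++ ')' :: []))) ++ s.drop (i + j + m + 4) := by
                  rw [hdrop, hc]
                  simp only [List.cons_append, List.append_assoc, List.nil_append,
                    List.cons.injEq, true_and]
                  conv_lhs => rw [hjdec, hpost, hd2]
                  congr 2
                  simp only [List.cons_append, List.cons.injEq, true_and]
                  conv_lhs => rw [hmdec, hd4]
                rw [hdec]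
                have hlen_take : ((('[' : Char) :: ((s.drop (i + 1)).take j ++ ']' :: '(' ::
                    ((s.drop (i + j + 3)).take m ++ ')' :: []))) : List Char).length = i + j + m + 4 - i := by
                  have hjlt' : j < s.length - (i + 1) := by omega
                  have hmlt' : m < s.length - (i + j + 3) := by
                    have hz := hmlt
                    simp only [List.length_drop] at hz
                    omega
                  have hb1' : i + j + 2 < s.length := by omega
                  simp only [List.length_cons, List.length_append, List.length_take,
                    List.length_singleton, List.length_drop, List.length_nil]
                  rw [Nat.min_eq_left (le_of_lt hjlt'), Nat.min_eq_left (le_of_lt hmlt')]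
                  omega
                rw [List.take_left' hlen_take]
              rw [hlink, hslice]
              have h1B : pvSplitAfter ']' (s.drop (i + 1)) =
                  some ((s.drop (i + 1)).take j, '(' :: s.drop (i + j + 3)) := by
                rw [hsplit, hpost, hd2]
              have h3B : pvSplitAfter ')' (s.drop (i + j + 3)) =
                  some ((s.drop (i + j + 3)).take m, s.drop (i + j + m + 4)) := by
                unfold pvSplitAfter
                rw [hM]
                dsimp only
                rw [hd4]
              rw [ih s (i + j + m + 4) _ (by omega), hdrop, hc,
                fixAlt_link (s.drop (i + 1)) ((s.drop (i + 1)).take j) (s.drop (i + j + 3))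
                  ((s.drop (i + j + 3)).take m) (s.drop (i + j + m + 4)) h1B h3B]
              simp [List.append_assoc]
          · have hnb : ¬ (PySem.Chars.findFrom s [']'] ((i + 1 : Nat) : Int) ≠ -1 ∧
                PySem.Chars.findFrom s [']'] ((i + 1 : Nat) : Int) + 1 < (s.length : Int) ∧
                PySem.List.pyGet? s (PySem.Chars.findFrom s [']'] ((i + 1 : Nat) : Int) + 1) = some '(') := by
              intro hx
              rw [hcb, hgd] at hx
              exact hpar hx.2.2
            have hvac : ∀ pre rest2, pvSplitAfter ']' (s.drop (i + 1)) = some (pre, '(' :: rest2) →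
                pvSplitAfter ')' rest2 = none := by
              intro pre rest2 hx
              rw [hsplit] at hx
              simp only [Option.some.injEq, Prod.mk.injEq] at hx
              exfalso
              apply hpar
              rw [← List.head?_drop, hx.2]
              rfl
            rw [fixLoop_bracket_fail s i acc hi hc hnb, ih s (i + 1) acc hlen1, hdrop, hc,
              fixAlt_bracket_nolink _ hvac]
      · by_cases hc2 : s[i] = ']'
        · by_cases hpar : (s.drop (i + 1)).head? = some '('
          · have hget1 : s[i + 1]? = some '(' := by rw [← List.head?_drop]; exact hpar
            have hb1 : i + 1 < s.length := (List.getElem?_eq_some_iff.mp hget1).1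
            have hcond : ¬ (s[i] = ']' ∧ ((s.length : Int) ≤ ((i + 1 : Nat) : Int) ∨
                PySem.List.pyGet? s ((i + 1 : Nat) : Int) ≠ some '(')) := by
              intro hx
              rcases hx.2 with hx2 | hx2
              · omega
              · rw [PySem.List.pyGet?_natCast] at hx2
                exact hx2 hget1
            rw [fixLoop_copy s i acc hi hc hcond, ih s (i + 1) _ hlen1, hdrop, hc2,
              fixAlt_close_keep _ hpar]
            simp
          · have hcond : s[i] = ']' ∧ ((s.length : Int) ≤ ((i + 1 : Nat) : Int) ∨
                PySem.List.pyGet? s ((i + 1 : Nat) : Int) ≠ some '(') := by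
              refine ⟨hc2, ?_⟩
              by_cases hb1 : i + 1 < s.length
              · right
                rw [PySem.List.pyGet?_natCast, ← List.head?_drop]
                exact hpar
              · left; push_cast; omega
            rw [fixLoop_orphan_close s i acc hi hc hcond, ih s (i + 1) acc hlen1, hdrop, hc2,
              fixAlt_close_drop _ hpar]
        · have hcond : ¬ (s[i] = ']' ∧ ((s.length : Int) ≤ ((i + 1 : Nat) : Int) ∨
              PySem.List.pyGet? s ((i + 1 : Nat) : Int) ≠ some '(')) := fun hx => hc2 hx.1
          rw [fixLoop_copy s i acc hi hc hcond, ih s (i + 1) _ hlen1, hdrop,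
            fixAlt_copy _ _ hc hc2]
          simp
    · rw [fixLoop_done s i acc hi, List.drop_eq_nil_of_le (by omega), fixAlt_nil,
        List.append_nil]

-- ===== VERDICT (by name: the statement is the Claim_ definition above) =====
theorem fix_orphaned_brackets_py_spec : Claim_equal_fix_orphaned_brackets_py := by
  unfold Claim_equal_fix_orphaned_brackets_py Spec_fix_orphaned_brackets_py
  intro text _
  unfold fix_orphaned_brackets_py fix_orphaned_brackets_py_alt
  rw [pvFixLoop_eq (text.toList.length) text.toList 0 [] (by omega)]
  simp
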